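-- pv_equiv track=rewrite | github.com/tgrx/alpha | services/webapp/alpha/management/commands/conftest.py | ignore_on_copy
-- ===== SOURCE A (Python) =====
-- def ignore_on_copy(src: str, names: list[str]) -> list[str]:
--     assert src
--
--     names_set = set(names)
--
--     ignored_always = {
--         ".idea",
--         ".local",
--         ".venv",
--         ".vscode",
--         "__pycache__",
--     }
--
--     py_compiled = {
--         name
--         for name in names
--         if any(
--             name.endswith(ext)
--             for ext in {
--                 ".pyc",
--                 ".pyi",
--                 ".pyo",
--             }
--         )
--     }
--
--     ignored = names_set & (ignored_always | py_compiled)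
--
--     return sorted(ignored)
-- ===== SOURCE B (Python) =====
-- _IGNORED_ALWAYS = (".idea", ".local", ".venv", ".vscode", "__pycache__")
-- _COMPILED_EXTS = (".pyc", ".pyi", ".pyo")
--
--
-- def ignore_on_copy(src: str, names: list[str]) -> list[str]:
--     assert src
--     out = []
--     for name in sorted(names):
--         if out and out[-1] == name:
--             continue  # duplicate of the name just kept (equal names are adjacent)
--         if name in _IGNORED_ALWAYS or name.endswith(_COMPILED_EXTS):
--             out.append(name)
--     return out
-- ===== Notes on version B (the rewrite author's own statement) =====
-- stated objective: alternative
-- what changed: Replaced A's set algebra (build names_set and a py_compiled comprehension set, union with the constant set, intersect, then sort the set) by sort-first: B sorts the raw names once and makes a single scan over the sorted list, appending a name to a plain output list when it matches the tuple-membership/endswith predicate and deduplicating by comparing with the last kept name, so no set is ever built.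
import Mathlib
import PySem

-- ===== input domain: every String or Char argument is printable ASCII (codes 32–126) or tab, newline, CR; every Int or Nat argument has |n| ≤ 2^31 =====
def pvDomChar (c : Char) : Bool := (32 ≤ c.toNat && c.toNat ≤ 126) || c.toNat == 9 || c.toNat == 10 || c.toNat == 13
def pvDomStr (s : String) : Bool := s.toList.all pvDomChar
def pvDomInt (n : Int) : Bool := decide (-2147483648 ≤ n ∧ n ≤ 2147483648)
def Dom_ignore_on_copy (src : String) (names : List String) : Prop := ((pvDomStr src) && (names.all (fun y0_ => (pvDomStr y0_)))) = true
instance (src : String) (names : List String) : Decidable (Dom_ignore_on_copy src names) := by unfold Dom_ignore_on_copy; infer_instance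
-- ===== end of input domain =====

-- B replaces A's set algebra (three sets combined by union and intersection, then
-- sorted) by sort-first: one scan over sorted(names) appending matching names to a
-- plain list, deduplicating by comparing with the last kept name; objective: simpler.

-- ===== PORT A =====
def ignore_on_copy (src : String) (names : List String) : List String :=
  -- `assert src` raises on empty src: excluded by Pre_ignore_on_copy
  let names_set : PySem.Set String := PySem.Set.ofList names
  let ignored_always : PySem.Set String :=
    PySem.Set.ofList [".idea", ".local", ".venv", ".vscode", "__pycache__"]
  let py_compiled : PySem.Set String :=
    PySem.Set.ofList (names.filter (fun name =>
      [".pyc", ".pyi", ".pyo"].any (fun ext => PySem.Str.endswith name ext)))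
  let ignored := PySem.Set.inter names_set (PySem.Set.union ignored_always py_compiled)
  PySem.List.sorted ignored (fun x => x) false

-- ===== PORT B =====
-- 'name in _IGNORED_ALWAYS or name.endswith(_COMPILED_EXTS)' (tuple membership / tuple endswith)
def pvMatches (name : String) : Bool :=
  ([".idea", ".local", ".venv", ".vscode", "__pycache__"] : List String).contains name
  || (PySem.Str.endswith name ".pyc" || PySem.Str.endswith name ".pyi"
      || PySem.Str.endswith name ".pyo")

-- the body of B's for-loop: skip a duplicate of the last kept name, else append on match
def pvStep (out : List String) (name : String) : List String :=
  if out.getLast? = some name then out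
  else if pvMatches name then out ++ [name] else out

def ignore_on_copy_alt (src : String) (names : List String) : List String :=
  (PySem.List.sorted names (fun x => x) false).foldl pvStep []

-- ===== PRECONDITION & SPEC =====
-- A's 'assert src' raises AssertionError on the empty source string.
def Pre_ignore_on_copy (src : String) (names : List String) : Prop := src ≠ ""
instance (src : String) (names : List String) : Decidable (Pre_ignore_on_copy src names) := by
  unfold Pre_ignore_on_copy; infer_instance
def pvWitness_ignore_on_copy : String × List String := ("/src", [".venv", "a.pyc", "setup.py"])

def Spec_ignore_on_copy (src : String) (names : List String) (out : List String) : Prop := out = ignore_on_copy_alt src names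
instance (src : String) (names : List String) (out : List String) : Decidable (Spec_ignore_on_copy src names out) := by unfold Spec_ignore_on_copy; infer_instance

-- ===== CLAIM (what is proved, stated in full; the proofs are below) =====
def Claim_equal_ignore_on_copy : Prop := ∀ (src : String) (names : List String), Dom_ignore_on_copy src names → Pre_ignore_on_copy src names → Spec_ignore_on_copy src names (ignore_on_copy src names)

-- ===== LEMMAS AND PROOFS =====

-- in a strictly increasing list, a member that dominates every element is the last one
theorem pvLast_of_max : ∀ (l : List String) (a : String), l.Pairwise (· < ·) → a ∈ l →
    (∀ b ∈ l, b ≤ a) → l.getLast? = some a := by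
  intro l
  induction l with
  | nil => intro a _ ha _; simp at ha
  | cons c t ih =>
    intro a hl ha hmax
    cases t with
    | nil =>
      have : a = c := by simpa using ha
      simp [this]
    | cons d t' =>
      rw [List.getLast?_cons_cons]
      rcases List.mem_cons.mp ha with rfl | hat
      · have hcd : a < d := (List.pairwise_cons.mp hl).1 d (by simp)
        have hdc : d ≤ a := hmax d (by simp)
        exact absurd (lt_of_lt_of_le hcd hdc) (lt_irrefl a)
      · exact ih a (List.pairwise_cons.mp hl).2 hat
          (fun b hb => hmax b (List.mem_cons_of_mem _ hb))

-- invariant of B's scan over a ≤-sorted list: the accumulator stays strictly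
-- increasing and collects exactly the matching names seen so far
theorem pvScan_spec : ∀ (s acc : List String), s.Pairwise (· ≤ ·) → acc.Pairwise (· < ·) →
    (∀ a ∈ acc, ∀ x ∈ s, a ≤ x) →
    (s.foldl pvStep acc).Pairwise (· < ·) ∧
    (∀ y, y ∈ s.foldl pvStep acc ↔ y ∈ acc ∨ (y ∈ s ∧ pvMatches y = true)) := by
  intro s
  induction s with
  | nil => intro acc _ hacc _; exact ⟨hacc, by simp⟩
  | cons a t ih =>
    intro acc hs hacc hle
    have hat : ∀ x ∈ t, a ≤ x := (List.pairwise_cons.mp hs).1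
    have hts : t.Pairwise (· ≤ ·) := (List.pairwise_cons.mp hs).2
    simp only [List.foldl_cons]
    by_cases hlast : acc.getLast? = some a
    · have hmem : a ∈ acc := List.mem_of_getLast? hlast
      have hstep : pvStep acc a = acc := by rw [pvStep, if_pos hlast]
      rw [hstep]
      obtain ⟨h1, h2⟩ := ih acc hts hacc (fun b hb x hx => hle b hb x (List.mem_cons_of_mem _ hx))
      refine ⟨h1, fun y => ?_⟩
      rw [h2 y]
      constructor
      · rintro (hy | hy)
        exacts [Or.inl hy, Or.inr ⟨List.mem_cons_of_mem _ hy.1, hy.2⟩]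
      · rintro (hy | ⟨hy1, hy2⟩)
        · exact Or.inl hy
        · rcases List.mem_cons.mp hy1 with rfl | hyt
          · exact Or.inl hmem
          · exact Or.inr ⟨hyt, hy2⟩
    · by_cases hm : pvMatches a = true
      · have hstep : pvStep acc a = acc ++ [a] := by rw [pvStep, if_neg hlast, if_pos hm]
        rw [hstep]
        have hnotmem : a ∉ acc := by
          intro hin
          exact hlast (pvLast_of_max acc a hacc hin
            (fun b hb => hle b hb a (List.mem_cons_self ..)))
        have hacc' : (acc ++ [a]).Pairwise (· < ·) := by
          rw [List.pairwise_append]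
          refine ⟨hacc, List.pairwise_singleton .., fun b hb c hc => ?_⟩
          have hc' : c = a := by simpa using hc
          subst hc'
          have hba : b ≤ c := hle b hb c (List.mem_cons_self ..)
          exact lt_of_le_of_ne hba (fun h => hnotmem (h ▸ hb))
        have hle' : ∀ b ∈ acc ++ [a], ∀ x ∈ t, b ≤ x := by
          intro b hb x hx
          rcases List.mem_append.mp hb with hb | hb
          · exact hle b hb x (List.mem_cons_of_mem _ hx)
          · have hba : b = a := by simpa using hb
            exact hba ▸ hat x hx
        obtain ⟨h1, h2⟩ := ih (acc ++ [a]) hts hacc' hle'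
        refine ⟨h1, fun y => ?_⟩
        rw [h2 y]
        simp only [List.mem_append, List.mem_cons, List.not_mem_nil, or_false]
        constructor
        · rintro ((hy | rfl) | hy)
          · exact Or.inl hy
          · exact Or.inr ⟨Or.inl rfl, hm⟩
          · exact Or.inr ⟨Or.inr hy.1, hy.2⟩
        · rintro (hy | ⟨(rfl | hyt), hym⟩)
          · exact Or.inl (Or.inl hy)
          · exact Or.inl (Or.inr rfl)
          · exact Or.inr ⟨hyt, hym⟩
      · have hstep : pvStep acc a = acc := by rw [pvStep, if_neg hlast, if_neg hm]
        rw [hstep]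
        obtain ⟨h1, h2⟩ := ih acc hts hacc (fun b hb x hx => hle b hb x (List.mem_cons_of_mem _ hx))
        refine ⟨h1, fun y => ?_⟩
        rw [h2 y]
        constructor
        · rintro (hy | hy)
          exacts [Or.inl hy, Or.inr ⟨List.mem_cons_of_mem _ hy.1, hy.2⟩]
        · rintro (hy | ⟨hy1, hy2⟩)
          · exact Or.inl hy
          · rcases List.mem_cons.mp hy1 with rfl | hyt
            · exact absurd hy2 hm
            · exact Or.inr ⟨hyt, hy2⟩

-- membership in A's intersection set is exactly 'in names and matches B's predicate'
theorem pvMem_ignored (names : List String) (x : String) :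
    (x ∈ PySem.Set.inter (PySem.Set.ofList names)
      (PySem.Set.union
        (PySem.Set.ofList [".idea", ".local", ".venv", ".vscode", "__pycache__"])
        (PySem.Set.ofList (names.filter (fun name =>
          [".pyc", ".pyi", ".pyo"].any (fun ext => PySem.Str.endswith name ext))))))
    ↔ x ∈ names ∧ pvMatches x = true := by
  rw [PySem.Set.mem_inter, PySem.Set.mem_union, PySem.Set.mem_ofList, PySem.Set.mem_ofList,
    PySem.Set.mem_ofList]
  simp only [List.mem_filter, List.any_eq_true, pvMatches, Bool.or_eq_true,
    List.contains_eq_mem, decide_eq_true_eq]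
  constructor
  · rintro ⟨hx, hmem | ⟨_, ext, hextmem, he⟩⟩
    · exact ⟨hx, Or.inl hmem⟩
    · refine ⟨hx, Or.inr ?_⟩
      simp only [List.mem_cons, List.not_mem_nil, or_false] at hextmem
      rcases hextmem with rfl | rfl | rfl
      · exact Or.inl (Or.inl he)
      · exact Or.inl (Or.inr he)
      · exact Or.inr he
  · rintro ⟨hx, hmem | hext⟩
    · exact ⟨hx, Or.inl hmem⟩
    · refine ⟨hx, Or.inr ⟨hx, ?_⟩⟩
      rcases hext with (h | h) | h
      · exact ⟨".pyc", by simp, h⟩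
      · exact ⟨".pyi", by simp, h⟩
      · exact ⟨".pyo", by simp, h⟩

-- ===== VERDICT (by name: the statement is the Claim_ definition above) =====
theorem ignore_on_copy_spec : Claim_equal_ignore_on_copy := by
  intro src names _ _
  unfold Spec_ignore_on_copy ignore_on_copy ignore_on_copy_alt
  obtain ⟨hpw, hmem⟩ := pvScan_spec (PySem.List.sorted names (fun x => x) false) []
    (PySem.List.sorted_pairwise names (fun x => x)) List.Pairwise.nil (by simp)
  have hperm := (List.perm_ext_iff_of_nodup
    (hpw.imp (fun h => ne_of_lt h))
    (PySem.Set.nodup_inter (PySem.Set.ofList names) _ (PySem.Set.nodup_ofList _))).mpr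
    (fun x => by rw [hmem x, pvMem_ignored]; simp [PySem.List.mem_sorted])
  exact PySem.List.sorted_eq_of_perm_of_pairwise_lt _ _ _ hperm hpw
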